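-- pv_equiv track=rewrite | github.com/981377660LMT/algorithm-study | 11_动态规划/dp分类/线性dp/2355. Maximum Number of Books You Can Take.py | maximumBooks
-- ===== SOURCE A (Python) =====
-- from typing import List
--
-- def maximumBooks(books: List[int]) -> int:
--     """
--     n,nums[i]<=1e5
--     从连续的书架上拿走最多的书 每次拿的书数量必须严格递增
--
--     dp[i] 表示前i本书且取第i本书时 可以拿走的最大数量
--     需要找到之前 arr[j] < arr[i] - (i-j) 的第一个j
--     即对每个i找到左边第一个j 满足 arr[j] - j < arr[i] - i
--     `dp[i]=dp[j]+(j+1到i这一段等差数列的和)`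
--     """
--     n = len(books)
--     firstJ = [-1] * n  # !对每个i找到左边第一个j 满足 arr[j] - j < arr[i] - i
--     nums = [num - i for i, num in enumerate(books)]  # !对每个位置找到左边第一个比他严格小的数的位置 从右往左维护一个递增的单调栈
--     stack = []
--     for i in range(n - 1, -1, -1):
--         while stack and nums[stack[-1]] > nums[i]:
--             firstJ[stack.pop()] = i
--         stack.append(i)
--
--     dp = [0] * n
--     dp[0] = books[0]
--     for i in range(1, n):
--         j = firstJ[i]
--         count = min(i - j, books[i])  # 等差数列项数
--         first, last = max(1, books[i] - count + 1), books[i]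
--         sum_ = (first + last) * count // 2  # j+1 到 i 均匀增长的一段的和
--         dp[i] = sum_ + (dp[j] if j != -1 else 0)
--     return max(dp)
-- ===== SOURCE B (Python) =====
-- from typing import List
--
-- def maximumBooks(books: List[int]) -> int:
--     # Simpler one-pass rewrite: no nums array, no monotonic stack, no firstJ
--     # table; for each i, find the nearest j to the left with books[j]-j <
--     # books[i]-i by a direct backward scan, and build dp by appending.
--     dp = [books[0]]
--     for i in range(1, len(books)):
--         j = i - 1
--         while j >= 0 and books[j] - j >= books[i] - i:
--             j -= 1
--         count = min(i - j, books[i])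
--         first = max(1, books[i] - count + 1)
--         total = (first + books[i]) * count // 2
--         dp.append(total + (dp[j] if j != -1 else 0))
--     return max(dp)
-- ===== Notes on version B (the rewrite author's own statement) =====
-- stated objective: simpler
-- what changed: Replaces A's two-phase computation (a nums array plus a right-to-left monotonic stack filling a firstJ table, then a second dp pass over preallocated arrays) with a single left-to-right loop that finds each i's boundary j by a direct backward scan and builds dp by appending; no stack, no firstJ/nums arrays.
import Mathlib
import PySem

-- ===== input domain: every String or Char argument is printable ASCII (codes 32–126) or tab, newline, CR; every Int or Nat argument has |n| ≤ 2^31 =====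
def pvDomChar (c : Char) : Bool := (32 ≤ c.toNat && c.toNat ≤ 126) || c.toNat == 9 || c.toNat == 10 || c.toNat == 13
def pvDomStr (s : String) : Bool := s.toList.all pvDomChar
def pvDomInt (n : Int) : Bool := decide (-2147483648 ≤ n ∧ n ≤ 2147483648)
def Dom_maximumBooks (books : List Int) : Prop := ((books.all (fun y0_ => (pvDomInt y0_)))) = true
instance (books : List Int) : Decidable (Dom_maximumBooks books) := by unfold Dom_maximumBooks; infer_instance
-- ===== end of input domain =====

-- B replaces A's two-phase stack computation by one left-to-right loop with a direct
-- backward scan per position (simpler; same return value on every nonempty list).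

-- ===== PORT A =====
-- the inner 'while stack and nums[stack[-1]] > nums[i]: firstJ[stack.pop()] = i' loop;
-- the Lean list's head is the Python list's end (top of stack); stack indices are
-- always in range, so the pyGetD defaults are never reached
def popA (nums : List Int) (i : Int) : List Int → List Int → List Int × List Int
  | fJ, [] => (fJ, [])
  | fJ, t :: rest =>
      if PySem.List.pyGetD nums t 0 > PySem.List.pyGetD nums i 0 then
        popA nums i (PySem.List.pySetD fJ t i) rest
      else (fJ, t :: rest)

-- one iteration of 'for i in range(n - 1, -1, -1)'
def stepA (nums : List Int) (s : List Int × List Int) (i : Int) : List Int × List Int :=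
  let s' := popA nums i s.1 s.2
  (s'.1, i :: s'.2)

-- one iteration of 'for i in range(1, n)'
def stepDpA (books firstJ : List Int) (dp : List Int) (i : Int) : List Int :=
  let j := PySem.List.pyGetD firstJ i 0
  let bi := PySem.List.pyGetD books i 0
  let count := min (i - j) bi
  let first := max 1 (bi - count + 1)
  let last := bi
  let sum_ := PySem.Int.floordiv ((first + last) * count) 2
  PySem.List.pySetD dp i (sum_ + (if j ≠ -1 then PySem.List.pyGetD dp j 0 else 0))

-- 'dp[0] = books[0]' and 'max(dp)' raise on the empty list in Python; Pre_ excludes it,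
-- so the defaults of pyGetD/getD below are never reached on admitted inputs
def maximumBooks (books : List Int) : Int :=
  let n : Int := books.length
  let firstJ : List Int := List.replicate books.length (-1)
  let nums : List Int := (PySem.List.enumerate books).map (fun p => p.2 - p.1)
  let res := (PySem.List.pyRange (n - 1) (-1) (-1)).foldl (stepA nums) (firstJ, [])
  let dp : List Int := List.replicate books.length 0
  let dp := PySem.List.pySetD dp 0 (PySem.List.pyGetD books 0 0)
  let dp := (PySem.List.pyRange 1 n 1).foldl (stepDpA books res.1) dp
  (PySem.List.max? dp (fun x => x)).getD 0

-- ===== PORT B =====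
-- 'j = i - 1; while j >= 0 and books[j] - j >= books[i] - i: j -= 1'
def scanB (books : List Int) (i : Int) (j : Int) : Int :=
  if h : 0 ≤ j ∧ PySem.List.pyGetD books j 0 - j ≥ PySem.List.pyGetD books i 0 - i then
    scanB books i (j - 1)
  else j
termination_by (j + 1).toNat
decreasing_by omega

-- one iteration of B's single 'for i in range(1, len(books))' loop
def stepDpB (books : List Int) (dp : List Int) (i : Int) : List Int :=
  let j := scanB books i (i - 1)
  let bi := PySem.List.pyGetD books i 0
  let count := min (i - j) bi
  let first := max 1 (bi - count + 1)
  let total := PySem.Int.floordiv ((first + bi) * count) 2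
  dp ++ [total + (if j ≠ -1 then PySem.List.pyGetD dp j 0 else 0)]

-- 'dp = [books[0]]' and 'max(dp)' raise on the empty list in Python; Pre_ excludes it
def maximumBooks_alt (books : List Int) : Int :=
  let dp := (PySem.List.pyRange 1 (books.length : Int) 1).foldl (stepDpB books)
      [PySem.List.pyGetD books 0 0]
  (PySem.List.max? dp (fun x => x)).getD 0

-- ===== PRECONDITION & SPEC =====
-- Pre_ excludes exactly the empty list, on which both Pythons raise IndexError
def Pre_maximumBooks (books : List Int) : Prop := books ≠ []
instance (books : List Int) : Decidable (Pre_maximumBooks books) := by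
  unfold Pre_maximumBooks; infer_instance

def pvWitness_maximumBooks : List Int := [2, 1, 3]

def Spec_maximumBooks (books : List Int) (out : Int) : Prop := out = maximumBooks_alt books
instance (books : List Int) (out : Int) : Decidable (Spec_maximumBooks books out) := by
  unfold Spec_maximumBooks; infer_instance

-- ===== CLAIM (what is proved, stated in full; the proofs are below) =====
def Claim_equal_maximumBooks : Prop := ∀ (books : List Int), Dom_maximumBooks books →
  Pre_maximumBooks books → Spec_maximumBooks books (maximumBooks books)

-- ===== LEMMAS AND PROOFS =====

-- the value both programs compare throughout: nsF books k = books[k] - k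
def nsF (books : List Int) (k : Nat) : Int := books.getD k 0 - (k : Int)

-- reference 'nearest strictly smaller to the left': scanN books t m = the greatest
-- j < m with nsF j < nsF t, else -1 (downward scan from m-1)
def scanN (books : List Int) (t : Nat) : Nat → Int
  | 0 => -1
  | m + 1 => if nsF books m ≥ nsF books t then scanN books t m else (m : Int)

lemma scanN_lt_self (books : List Int) (t m : Nat) : scanN books t m < (m : Int) := by
  induction m with
  | zero => simp [scanN]
  | succ m ih =>
    simp only [scanN]
    split
    · calc scanN books t m < (m : Int) := ih
        _ < ((m + 1 : Nat) : Int) := by push_cast; omega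
    · push_cast; omega

lemma scanN_cases (books : List Int) (t m : Nat) :
    scanN books t m = -1 ∨ ∃ p : Nat, p < m ∧ scanN books t m = (p : Int) := by
  induction m with
  | zero => simp [scanN]
  | succ m ih =>
    simp only [scanN]; split
    · rcases ih with h | ⟨p, hp, he⟩
      · exact Or.inl h
      · exact Or.inr ⟨p, by omega, he⟩
    · exact Or.inr ⟨m, by omega, rfl⟩

lemma scanN_lt_iff (books : List Int) (t m : Nat) (c : Nat) :
    scanN books t m < (c : Int) ↔ ∀ j : Nat, c ≤ j → j < m → nsF books j ≥ nsF books t := by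
  induction m with
  | zero => simp [scanN]; omega
  | succ m ih =>
    simp only [scanN]
    split
    · rename_i hge
      rw [ih]
      constructor
      · intro h j hc hj
        rcases Nat.lt_or_ge j m with hjm | hjm
        · exact h j hc hjm
        · have : j = m := by omega
          subst this; exact hge
      · intro h j hc hj; exact h j hc (by omega)
    · rename_i hlt
      constructor
      · intro h j hc hj
        exfalso; have : (m : Int) < (c : Int) := h
        omega
      · intro h
        by_contra hcm
        have hcm' : c ≤ m := by omega
        exact hlt (h m hcm' (by omega))

-- B's while loop computes scanN
lemma scanB_eq_scanN (books : List Int) (i m : Nat) :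
    scanB books (i : Int) ((m : Int) - 1) = scanN books i m := by
  induction m with
  | zero =>
    rw [scanB]
    simp [scanN]
  | succ m ih =>
    rw [scanB]
    have harg : ((m + 1 : Nat) : Int) - 1 = (m : Nat) := by push_cast; omega
    rw [harg]
    by_cases hc : nsF books m ≥ nsF books i
    · have : (0 : Int) ≤ (m : Nat) ∧
        PySem.List.pyGetD books (m : Nat) 0 - (m : Nat) ≥
          PySem.List.pyGetD books (i : Int) 0 - (i : Int) := by
        refine ⟨by positivity, ?_⟩
        simpa [PySem.List.pyGetD_natCast, nsF] using hc
      rw [dif_pos this]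
      simpa [scanN, hc] using ih
    · have : ¬ ((0 : Int) ≤ (m : Nat) ∧
        PySem.List.pyGetD books (m : Nat) 0 - (m : Nat) ≥
          PySem.List.pyGetD books (i : Int) 0 - (i : Int)) := by
        intro ⟨_, h2⟩
        apply hc
        simpa [PySem.List.pyGetD_natCast, nsF] using h2
      rw [dif_neg this]
      simp [scanN, hc]

-- A's 'nums' comprehension evaluates to nsF
lemma nums_getD (books : List Int) (k : Nat) (hk : k < books.length) :
    ((PySem.List.enumerate books).map (fun p => p.2 - p.1)).getD k 0 = nsF books k := by
  have hlen : ((PySem.List.enumerate books).map (fun p => p.2 - p.1)).length = books.length := by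
    simp [PySem.List.length_enumerate]
  rw [List.getD_eq_getElem _ _ (by omega)]
  simp [PySem.List.getElem_enumerate, nsF, List.getD_eq_getElem?_getD,
    List.getElem?_eq_getElem hk]

-- the canonical content of A's monotonic stack once everything down to index lo has
-- been processed (Nat indices; head = top of stack = smallest index)
def SN (books : List Int) (lo : Nat) : List Nat :=
  (List.range' lo (books.length - lo)).filter
    (fun k => decide (scanN books k k < (lo : Int)))

lemma SN_mem (books : List Int) (lo k : Nat) (h : k ∈ SN books lo) :
    lo ≤ k ∧ k < books.length ∧ scanN books k k < (lo : Int) := by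
  unfold SN at h
  rw [List.mem_filter] at h
  obtain ⟨hr, hq⟩ := h
  rw [List.mem_range'] at hr
  obtain ⟨i, hi, rfl⟩ := hr
  refine ⟨by omega, by omega, by simpa using hq⟩

-- nsF is non-increasing from the top of the stack downward
lemma SN_pairwise (books : List Int) (lo : Nat) :
    (SN books lo).Pairwise (fun a b => nsF books a ≥ nsF books b) := by
  have h1 : (SN books lo).Pairwise (· < ·) :=
    List.Pairwise.sublist List.filter_sublist List.pairwise_lt_range'
  refine List.Pairwise.imp_of_mem ?_ h1
  intro a b ha hb hab
  obtain ⟨hbl, hbn, hbq⟩ := SN_mem books lo b hb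
  obtain ⟨hal, _, _⟩ := SN_mem books lo a ha
  exact (scanN_lt_iff books b b lo).1 hbq a hal hab

-- the pop loop pops exactly the strictly larger prefix and records lo for each pop
lemma popA_spec (books : List Int) (lo : Nat) (hlo : lo < books.length)
    (S : List Nat) (F : List Int) (hF : F.length = books.length)
    (hmem : ∀ k ∈ S, lo < k ∧ k < books.length)
    (hpw : S.Pairwise (fun a b => nsF books a ≥ nsF books b)) :
    (popA ((PySem.List.enumerate books).map (fun p => p.2 - p.1)) (lo : Int) F
        (S.map (fun k : Nat => (k : Int)))).1.length = books.length ∧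
    (∀ k, k < books.length →
      (popA ((PySem.List.enumerate books).map (fun p => p.2 - p.1)) (lo : Int) F
        (S.map (fun k : Nat => (k : Int)))).1.getD k 0 =
        (if k ∈ S ∧ nsF books lo < nsF books k then (lo : Int) else F.getD k 0)) ∧
    (popA ((PySem.List.enumerate books).map (fun p => p.2 - p.1)) (lo : Int) F
        (S.map (fun k : Nat => (k : Int)))).2 =
      (S.filter (fun k => decide (nsF books lo ≥ nsF books k))).map (fun k : Nat => (k : Int)) := by
  induction S generalizing F with
  | nil =>
    refine ⟨by simpa [popA] using hF, ?_, by simp [popA]⟩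
    intro k hk
    simp [popA]
  | cons k0 rest ih =>
    have hk0 := hmem k0 (by simp)
    have hcond : PySem.List.pyGetD ((PySem.List.enumerate books).map (fun p => p.2 - p.1)) ((k0 : Nat) : Int) 0 = nsF books k0 := by
      rw [PySem.List.pyGetD_natCast]; exact nums_getD books k0 hk0.2
    have hcondlo : PySem.List.pyGetD ((PySem.List.enumerate books).map (fun p => p.2 - p.1)) ((lo : Nat) : Int) 0 = nsF books lo := by
      rw [PySem.List.pyGetD_natCast]; exact nums_getD books lo hlo
    by_cases hgt : nsF books lo < nsF books k0
    · have hstep : popA ((PySem.List.enumerate books).map (fun p => p.2 - p.1)) (lo : Int) F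
          ((k0 :: rest).map (fun k : Nat => (k : Int))) =
        popA ((PySem.List.enumerate books).map (fun p => p.2 - p.1)) (lo : Int)
          (F.set k0 (lo : Int)) (rest.map (fun k : Nat => (k : Int))) := by
        rw [List.map_cons]
        rw [popA]
        rw [hcond, hcondlo, if_pos (by omega), PySem.List.pySetD_natCast]
      rw [hstep]
      have hFs : (F.set k0 (lo : Int)).length = books.length := by
        rw [List.length_set]; exact hF
      obtain ⟨ih1, ih2, ih3⟩ := ih (F.set k0 (lo : Int)) hFs
        (fun k hk => hmem k (by simp [hk])) (hpw.sublist (List.sublist_cons_self _ _))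
      refine ⟨ih1, ?_, ?_⟩
      · intro k hk
        rw [ih2 k hk]
        by_cases hkr : k ∈ rest ∧ nsF books lo < nsF books k
        · rw [if_pos hkr, if_pos ⟨by simp [hkr.1], hkr.2⟩]
        · rw [if_neg hkr]
          by_cases hkk0 : k = k0
          · subst hkk0
            rw [if_pos ⟨by simp, hgt⟩]
            rw [List.getD_eq_getElem _ _ (by rw [hFs]; omega),
              List.getElem_set_self (by rw [hFs]; omega)]
          · have hno : ¬ (k ∈ k0 :: rest ∧ nsF books lo < nsF books k) := by
              intro ⟨h1, h2⟩
              rcases List.mem_cons.1 h1 with h | h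
              · exact hkk0 h
              · exact hkr ⟨h, h2⟩
            rw [if_neg hno]
            rw [List.getD_eq_getElem _ _ (by rw [hFs]; omega),
              List.getD_eq_getElem _ _ (by rw [hF]; omega)]
            rw [List.getElem_set_ne (show k0 ≠ k by omega)]
      · rw [ih3]
        have hd : decide (nsF books lo ≥ nsF books k0) = false := by
          simp; omega
        rw [List.filter_cons, hd]
        simp
    · have hret : popA ((PySem.List.enumerate books).map (fun p => p.2 - p.1)) (lo : Int) F
          ((k0 :: rest).map (fun k : Nat => (k : Int))) =
          (F, (k0 :: rest).map (fun k : Nat => (k : Int))) := by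
        rw [List.map_cons]
        rw [popA]
        rw [hcond, hcondlo, if_neg (by omega)]
      have hall : ∀ k ∈ k0 :: rest, nsF books lo ≥ nsF books k := by
        intro k hk
        rcases List.mem_cons.1 hk with h | h
        · subst h; omega
        · have := (List.pairwise_cons.1 hpw).1 k h
          omega
      refine ⟨by rw [hret]; exact hF, ?_, ?_⟩
      · intro k hk
        rw [hret]
        have hno : ¬ (k ∈ k0 :: rest ∧ nsF books lo < nsF books k) := by
          intro ⟨h1, h2⟩; have := hall k h1; omega
        rw [if_neg hno]
      · rw [hret]
        have : (k0 :: rest).filter (fun k => decide (nsF books lo ≥ nsF books k)) = k0 :: rest :=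
          List.filter_eq_self.2 (fun a ha => decide_eq_true (hall a ha))
        rw [this]

-- pushing lo onto the popped stack gives the canonical stack at level lo
lemma SN_cons (books : List Int) (lo : Nat) (hlo : lo < books.length) :
    SN books lo = lo :: (SN books (lo + 1)).filter
      (fun k => decide (nsF books lo ≥ nsF books k)) := by
  unfold SN
  have h1 : books.length - lo = (books.length - (lo + 1)) + 1 := by omega
  rw [h1, List.range'_succ]
  rw [List.filter_cons_of_pos (by simpa using scanN_lt_self books lo lo)]
  congr 1
  rw [List.filter_filter]
  apply List.filter_congr
  intro k hk
  have hk1 : lo + 1 ≤ k ∧ k < books.length := by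
    rw [List.mem_range'] at hk; omega
  have e1 := scanN_lt_iff books k k lo
  have e2 := scanN_lt_iff books k k (lo + 1)
  rw [Bool.eq_iff_iff]
  simp only [decide_eq_true_iff, Bool.and_eq_true]
  constructor
  · intro h
    have hall := e1.1 h
    refine ⟨by have := hall lo (le_refl _) (by omega); omega, e2.2 ?_⟩
    intro j hj1 hj2; exact hall j (by omega) hj2
  · intro ⟨hge, h2⟩
    apply e1.2
    intro j hj1 hj2
    by_cases hjlo : j = lo
    · subst hjlo; omega
    · exact e2.1 h2 j (by omega) hj2

-- splitting one step off the right end of range(n - 1, lo - 1, -1)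
lemma seg_split (n lo : Nat) (h : lo < n) :
    PySem.List.pyRange ((n : Int) - 1) ((lo : Int) - 1) (-1) =
      PySem.List.pyRange ((n : Int) - 1) (((lo + 1 : Nat) : Int) - 1) (-1) ++ [(lo : Int)] := by
  rw [PySem.List.pyRange_neg_one_eq_reverse, PySem.List.pyRange_neg_one_eq_reverse]
  have e1 : (lo : Int) - 1 + 1 = (lo : Int) := by omega
  have e2 : (n : Int) - 1 + 1 = (n : Int) := by omega
  have e3 : ((lo + 1 : Nat) : Int) - 1 + 1 = (lo : Int) + 1 := by push_cast; omega
  rw [e1, e2, e3]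
  rw [PySem.List.pyRange_one_cons (by exact_mod_cast h)]
  simp

-- invariant of A's first pass, stated after processing all indices ≥ lo
lemma pass1_inv (books : List Int) (lo : Nat) (hlo : lo ≤ books.length) :
    ((PySem.List.pyRange ((books.length : Int) - 1) ((lo : Int) - 1) (-1)).foldl
        (stepA ((PySem.List.enumerate books).map (fun p => p.2 - p.1)))
        (List.replicate books.length (-1), ([] : List Int))).1.length = books.length ∧
    (∀ k, k < books.length →
      ((PySem.List.pyRange ((books.length : Int) - 1) ((lo : Int) - 1) (-1)).foldl
        (stepA ((PySem.List.enumerate books).map (fun p => p.2 - p.1)))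
        (List.replicate books.length (-1), ([] : List Int))).1.getD k 0 =
        (if (lo : Int) ≤ scanN books k k then scanN books k k else -1)) ∧
    ((PySem.List.pyRange ((books.length : Int) - 1) ((lo : Int) - 1) (-1)).foldl
        (stepA ((PySem.List.enumerate books).map (fun p => p.2 - p.1)))
        (List.replicate books.length (-1), ([] : List Int))).2 =
      (SN books lo).map (fun k : Nat => (k : Int)) := by
  obtain ⟨d, hd⟩ : ∃ d, lo + d = books.length := ⟨books.length - lo, by omega⟩
  clear hlo
  induction d generalizing lo with
  | zero =>
    have hlon : lo = books.length := by omega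
    subst hlon
    rw [PySem.List.pyRange_neg_one_eq_nil (by omega)]
    simp only [List.foldl_nil]
    refine ⟨by simp, ?_, ?_⟩
    · intro k hk
      have hs := scanN_lt_self books k k
      rw [if_neg (by push_cast; omega)]
      rw [List.getD_eq_getElem _ _ (by simpa using hk)]
      simp
    · unfold SN
      simp
  | succ d ih =>
    have hlo1 : lo + 1 + d = books.length := by omega
    obtain ⟨ih1, ih2, ih3⟩ := ih (lo + 1) hlo1
    have hlon : lo < books.length := by omega
    rw [seg_split books.length lo hlon, List.foldl_append]
    set st := ((PySem.List.pyRange ((books.length : Int) - 1) (((lo + 1 : Nat) : Int) - 1) (-1)).foldl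
        (stepA ((PySem.List.enumerate books).map (fun p => p.2 - p.1)))
        (List.replicate books.length (-1), ([] : List Int))) with hst
    obtain ⟨p1, p2, p3⟩ := popA_spec books lo hlon (SN books (lo + 1)) st.1 ih1
      (fun k hk => by have := SN_mem books (lo + 1) k hk; omega)
      (SN_pairwise books (lo + 1))
    simp only [List.foldl_cons, List.foldl_nil, stepA]
    rw [← ih3] at p1 p2 p3
    refine ⟨p1, ?_, ?_⟩
    · intro k hk
      rw [p2 k hk, ih2 k hk]
      have hA : k ∈ SN books (lo + 1) ∧ nsF books lo < nsF books k → scanN books k k = (lo : Int) := by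
        intro ⟨hmem, hns⟩
        obtain ⟨h1, h2, h3⟩ := SN_mem books (lo + 1) k hmem
        have hnlt : ¬ scanN books k k < (lo : Int) := by
          intro hcon
          have := (scanN_lt_iff books k k lo).1 hcon lo (le_refl _) (by omega)
          omega
        push_cast at h3 ⊢
        omega
      have hB : scanN books k k = (lo : Int) → k ∈ SN books (lo + 1) ∧ nsF books lo < nsF books k := by
        intro heq
        have hlok : lo < k := by
          have := scanN_lt_self books k k; omega
        have hq : scanN books k k < ((lo + 1 : Nat) : Int) := by push_cast; omega
        have hmem : k ∈ SN books (lo + 1) := by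
          unfold SN
          rw [List.mem_filter, List.mem_range']
          exact ⟨⟨k - (lo + 1), by omega, by omega⟩, by simpa using hq⟩
        refine ⟨hmem, ?_⟩
        by_contra hns
        have : scanN books k k < (lo : Int) := by
          apply (scanN_lt_iff books k k lo).2
          intro j hj1 hj2
          by_cases hjlo : j = lo
          · subst hjlo; omega
          · exact (scanN_lt_iff books k k (lo + 1)).1 (by push_cast; push_cast at hq; omega) j (by omega) hj2
        omega
      by_cases hc : k ∈ SN books (lo + 1) ∧ nsF books lo < nsF books k
      · rw [if_pos hc, if_pos (by rw [hA hc])]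
        exact (hA hc).symm
      · rw [if_neg hc]
        have hne : scanN books k k ≠ (lo : Int) := fun h => hc (hB h)
        by_cases h1 : ((lo + 1 : Nat) : Int) ≤ scanN books k k
        · rw [if_pos h1, if_pos (by push_cast at h1 ⊢; omega)]
        · rw [if_neg h1, if_neg (by push_cast at h1 hne ⊢; omega)]
    · rw [p3, SN_cons books lo hlon]
      simp

-- the dp list B builds, indexed by how many positions i = 1..m have been processed
def dpLB (books : List Int) : Nat → List Int
  | 0 => [books.getD 0 0]
  | m + 1 => stepDpB books (dpLB books m) ((m : Int) + 1)

lemma dpLB_length (books : List Int) (m : Nat) : (dpLB books m).length = m + 1 := by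
  induction m with
  | zero => simp [dpLB]
  | succ m ih => simp [dpLB, stepDpB, ih]

lemma set_append_len {α : Type} (l₁ : List α) (a v : α) (l₂ : List α) :
    (l₁ ++ a :: l₂).set l₁.length v = l₁ ++ v :: l₂ := by
  induction l₁ with
  | nil => simp
  | cons x xs ih => simp [ih]

lemma foldB_eq (books : List Int) (m : Nat) :
    (PySem.List.pyRange 1 ((m : Int) + 1) 1).foldl (stepDpB books)
        [PySem.List.pyGetD books 0 0] = dpLB books m := by
  induction m with
  | zero =>
    rw [PySem.List.pyRange_one_eq_nil (by omega)]
    simp [dpLB, PySem.List.pyGetD_zero]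
  | succ m ih =>
    have e : ((m + 1 : Nat) : Int) + 1 = ((m : Int) + 1) + 1 := by push_cast; ring
    rw [e, PySem.List.pyRange_one_succ_right (by omega), List.foldl_append]
    rw [ih]
    simp [dpLB]

-- A's second pass equals B's loop, padded with the not-yet-written zeros
lemma foldA_eq (books : List Int) (firstJ : List Int)
    (hF : ∀ k, k < books.length → firstJ.getD k 0 = scanN books k k)
    (hne : books ≠ []) (m : Nat) (hm : m ≤ books.length - 1) :
    (PySem.List.pyRange 1 ((m : Int) + 1) 1).foldl (stepDpA books firstJ)
        (PySem.List.pySetD (List.replicate books.length 0) 0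
          (PySem.List.pyGetD books 0 0)) =
      dpLB books m ++ List.replicate (books.length - 1 - m) 0 := by
  have hn1 : 1 ≤ books.length := by
    cases books with
    | nil => exact absurd rfl hne
    | cons a l => simp
  induction m with
  | zero =>
    rw [PySem.List.pyRange_one_eq_nil (by omega)]
    simp only [List.foldl_nil]
    have h0 : PySem.List.pySetD (List.replicate books.length (0:Int)) 0
        (PySem.List.pyGetD books 0 0) =
        (List.replicate books.length (0:Int)).set 0 (PySem.List.pyGetD books 0 0) := by
      simp [PySem.List.pySetD_of_nonneg]
    rw [h0]
    have h1 : books.length = (books.length - 1) + 1 := by omega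
    rw [h1, List.replicate_succ, List.set_cons_zero]
    simp [dpLB, PySem.List.pyGetD_zero]
  | succ m ih =>
    have e : ((m + 1 : Nat) : Int) + 1 = ((m : Int) + 1) + 1 := by push_cast; ring
    rw [e, PySem.List.pyRange_one_succ_right (by omega), List.foldl_append]
    rw [ih (by omega)]
    have hi : ((m : Int) + 1) = ((m + 1 : Nat) : Int) := by push_cast; ring
    have hm1 : m + 1 < books.length := by omega
    simp only [List.foldl_cons, List.foldl_nil]
    simp only [stepDpA, stepDpB, dpLB]
    have hj : PySem.List.pyGetD firstJ ((m : Int) + 1) 0 = scanN books (m + 1) (m + 1) := by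
      rw [hi, PySem.List.pyGetD_natCast]
      exact hF (m + 1) hm1
    have hjB : scanB books ((m : Int) + 1) ((m : Int) + 1 - 1) = scanN books (m + 1) (m + 1) := by
      rw [hi]
      exact scanB_eq_scanN books (m + 1) (m + 1)
    rw [hj, hjB]
    have hlook : (if scanN books (m + 1) (m + 1) ≠ -1 then
          PySem.List.pyGetD (dpLB books m ++ List.replicate (books.length - 1 - m) 0)
            (scanN books (m + 1) (m + 1)) 0 else 0) =
        (if scanN books (m + 1) (m + 1) ≠ -1 then
          PySem.List.pyGetD (dpLB books m) (scanN books (m + 1) (m + 1)) 0 else 0) := by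
      rcases scanN_cases books (m + 1) (m + 1) with h | ⟨p, hp, h⟩
      · rw [h]; simp
      · rw [h]
        have hlen : p < (dpLB books m).length := by rw [dpLB_length]; omega
        rw [if_pos (by omega), if_pos (by omega)]
        rw [PySem.List.pyGetD_natCast, PySem.List.pyGetD_natCast]
        rw [List.getD_eq_getElem _ _ (by simp [dpLB_length]; omega),
          List.getD_eq_getElem _ _ hlen]
        rw [List.getElem_append_left hlen]
    rw [hlook]
    have hset : ∀ v : Int,
        PySem.List.pySetD (dpLB books m ++ List.replicate (books.length - 1 - m) 0)
          ((m : Int) + 1) v =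
        (dpLB books m ++ [v]) ++ List.replicate (books.length - 1 - (m + 1)) 0 := by
      intro v
      rw [hi, PySem.List.pySetD_natCast]
      have h1 : books.length - 1 - m = (books.length - 1 - (m + 1)) + 1 := by omega
      rw [h1, List.replicate_succ]
      have h2 : m + 1 = (dpLB books m).length := by rw [dpLB_length]
      rw [h2, set_append_len]
      simp
    rw [hset]

-- ===== VERDICT (by name: the statement is the Claim_ definition above) =====
theorem maximumBooks_spec : Claim_equal_maximumBooks := by
  intro books _hdom hpre
  unfold Spec_maximumBooks
  have hn1 : 1 ≤ books.length := by
    cases books with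
    | nil => exact absurd rfl hpre
    | cons a l => simp
  simp only [maximumBooks, maximumBooks_alt]
  have hinv := pass1_inv books 0 (by omega)
  have h0 : ((0 : Nat) : Int) - 1 = -1 := by norm_num
  rw [h0] at hinv
  obtain ⟨hlen, hchar, _⟩ := hinv
  have hF : ∀ k, k < books.length →
      ((PySem.List.pyRange ((books.length : Int) - 1) (-1) (-1)).foldl
        (stepA ((PySem.List.enumerate books).map (fun p => p.2 - p.1)))
        (List.replicate books.length (-1), ([] : List Int))).1.getD k 0 =
      scanN books k k := by
    intro k hk
    rw [hchar k hk]
    rcases scanN_cases books k k with h | ⟨p, hp, h⟩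
    · rw [h]; norm_num
    · rw [h]; rw [if_pos (by positivity)]
  have hAB := foldA_eq books _ hF hpre (books.length - 1) (le_refl _)
  have hB := foldB_eq books (books.length - 1)
  have hcast : ((books.length - 1 : Nat) : Int) + 1 = (books.length : Int) := by
    push_cast [hn1]; omega
  rw [hcast] at hAB hB
  rw [hAB, hB]
  simp
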